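-- pv_equiv track=rewrite | github.com/SuBoll/SZl-identifier | general_szl_identifier/generate_nonisomorphic_szl.py | has_forbidden_3vertex_subgraph
-- ===== SOURCE A (Python) =====
-- from typing import Dict, List, Tuple, Optional, TextIO
--
-- def pair_to_count(counts: Tuple[int, ...], pairs: List[Tuple[int, int]]) -> Dict[Tuple[int, int], int]:
--     """Build dict (u,v) -> multiplicity for u < v."""
--     return {p: c for p, c in zip(pairs, counts)}
--
-- def has_forbidden_3vertex_subgraph(
--     counts: Tuple[int, ...], pairs: List[Tuple[int, int]], n: int, l_val: int
-- ) -> bool: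
--     """Check if graph contains a 3-vertex subgraph with ≥ 2l-2 edges (each pair mult ≤ l-1).
--     Such 3-vertex graphs are known to be SZ_l; we exclude them to reduce enumeration.
--     """
--     if n < 3:
--         return False
--     w = pair_to_count(counts, pairs)
--     threshold = 2 * l_val - 2
--     for i in range(1, n + 1):
--         for j in range(i + 1, n + 1):
--             for k in range(j + 1, n + 1):
--                 m_ij = w.get((i, j), 0)
--                 m_ik = w.get((i, k), 0)
--                 m_jk = w.get((j, k), 0)
--                 if m_ij + m_ik + m_jk >= threshold:
--                     return True
--     return False
-- ===== SOURCE B (Python) =====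
-- def has_forbidden_3vertex_subgraph(counts, pairs, n, l_val):
--     # Vertex-reduction: only vertices touching a relevant weighted pair, plus up
--     # to 3 spare untouched vertices (all untouched vertices are interchangeable),
--     # can matter; brute-force triples over that small vertex set only.
--     if n < 3:
--         return False
--     w = dict(zip(pairs, counts))
--     threshold = 2 * l_val - 2
--     covered = set()
--     for (u, v) in w:
--         if 1 <= u < v <= n:
--             covered.add(u)
--             covered.add(v)
--     spares = []
--     x = 1
--     while x <= n and len(spares) < 3:
--         if x not in covered:
--             spares.append(x)
--         x += 1
--     verts = sorted(covered.union(spares))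
--     for i in verts:
--         for j in verts:
--             if i < j:
--                 for k in verts:
--                     if j < k and w.get((i, j), 0) + w.get((i, k), 0) + w.get((j, k), 0) >= threshold:
--                         return True
--     return False
-- ===== Notes on version B (the rewrite author's own statement) =====
-- stated objective: faster
-- what changed: Instead of scanning all C(n,3) vertex triples, B reduces the vertex set to the endpoints of relevant weighted pairs plus at most 3 interchangeable untouched vertices and brute-forces triples over that small set, giving O(m + min(n, 2m+3)^3) instead of O(n^3).
import Mathlib
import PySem

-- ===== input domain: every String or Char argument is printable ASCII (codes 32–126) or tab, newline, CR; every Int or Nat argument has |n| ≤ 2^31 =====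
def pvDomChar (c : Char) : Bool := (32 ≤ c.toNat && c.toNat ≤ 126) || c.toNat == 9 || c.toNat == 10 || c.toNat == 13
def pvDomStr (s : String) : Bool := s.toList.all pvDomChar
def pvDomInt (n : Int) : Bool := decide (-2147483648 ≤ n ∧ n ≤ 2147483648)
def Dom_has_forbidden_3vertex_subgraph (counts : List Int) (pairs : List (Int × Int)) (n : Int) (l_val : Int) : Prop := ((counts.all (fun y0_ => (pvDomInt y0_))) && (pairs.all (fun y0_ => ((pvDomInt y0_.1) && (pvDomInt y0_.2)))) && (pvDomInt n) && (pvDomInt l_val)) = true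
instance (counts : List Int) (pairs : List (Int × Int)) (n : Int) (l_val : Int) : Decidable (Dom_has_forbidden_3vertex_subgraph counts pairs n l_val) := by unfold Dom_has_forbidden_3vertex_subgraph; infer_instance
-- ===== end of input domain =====

-- B replaces A's scan of all C(n,3) vertex triples by a scan over a reduced vertex set:
-- the endpoints of relevant weighted pairs plus at most 3 untouched (interchangeable) vertices.

-- ===== PORT A =====
def pair_to_count (counts : List Int) (pairs : List (Int × Int)) : PySem.Dict (Int × Int) Int :=
  (pairs.zip counts).foldl (fun d pc => d.insert pc.1 pc.2) PySem.Dict.empty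

def has_forbidden_3vertex_subgraph (counts : List Int) (pairs : List (Int × Int)) (n : Int) (l_val : Int) : Bool :=
  if n < 3 then false
  else
    let w := pair_to_count counts pairs
    let threshold := 2 * l_val - 2
    (PySem.List.pyRange 1 (n + 1) 1).any (fun i =>
      (PySem.List.pyRange (i + 1) (n + 1) 1).any (fun j =>
        (PySem.List.pyRange (j + 1) (n + 1) 1).any (fun k =>
          decide (w.getD (i, j) 0 + w.getD (i, k) 0 + w.getD (j, k) 0 ≥ threshold))))

-- ===== PORT B =====
-- w = dict(zip(pairs, counts))
def pvZipDict (pairs : List (Int × Int)) (counts : List Int) : PySem.Dict (Int × Int) Int :=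
  (pairs.zip counts).foldl (fun d pc => d.insert pc.1 pc.2) PySem.Dict.empty

-- covered = endpoints of relevant keys (u,v) of w, 1 <= u < v <= n
def pvCoveredSet (w : PySem.Dict (Int × Int) Int) (n : Int) : PySem.Set Int :=
  w.keys.foldl
    (fun s uv =>
      if 1 ≤ uv.1 ∧ uv.1 < uv.2 ∧ uv.2 ≤ n then PySem.Set.add (PySem.Set.add s uv.1) uv.2 else s)
    PySem.Set.empty

-- the while loop collecting up to 3 uncovered vertices
def pvSpares (covered : PySem.Set Int) (n : Int) (x : Int) (acc : List Int) : List Int :=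
  if h : x ≤ n ∧ acc.length < 3 then
    pvSpares covered n (x + 1) (if PySem.Set.contains covered x then acc else acc ++ [x])
  else acc
termination_by (n + 1 - x).toNat
decreasing_by omega

-- verts = sorted(covered.union(spares))
def pvVerts (w : PySem.Dict (Int × Int) Int) (n : Int) : List Int :=
  PySem.List.sorted
    (PySem.Set.union (pvCoveredSet w n) (pvSpares (pvCoveredSet w n) n 1 [])) (fun x => x) false

def has_forbidden_3vertex_subgraph_alt (counts : List Int) (pairs : List (Int × Int)) (n : Int) (l_val : Int) : Bool :=
  if n < 3 then false
  else
    let w := pvZipDict pairs counts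
    let threshold := 2 * l_val - 2
    let verts := pvVerts w n
    verts.any (fun i =>
      verts.any (fun j =>
        decide (i < j) &&
          verts.any (fun k =>
            decide (j < k) &&
              decide (w.getD (i, j) 0 + w.getD (i, k) 0 + w.getD (j, k) 0 ≥ threshold))))

-- ===== PRECONDITION & SPEC =====
def Spec_has_forbidden_3vertex_subgraph (counts : List Int) (pairs : List (Int × Int)) (n : Int) (l_val : Int) (out : Bool) : Prop := out = has_forbidden_3vertex_subgraph_alt counts pairs n l_val
instance (counts : List Int) (pairs : List (Int × Int)) (n : Int) (l_val : Int) (out : Bool) : Decidable (Spec_has_forbidden_3vertex_subgraph counts pairs n l_val out) := by unfold Spec_has_forbidden_3vertex_subgraph; infer_instance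

-- ===== CLAIM (what is proved, stated in full; the proofs are below) =====
def Claim_equal_has_forbidden_3vertex_subgraph : Prop := ∀ (counts : List Int) (pairs : List (Int × Int)) (n : Int) (l_val : Int), Dom_has_forbidden_3vertex_subgraph counts pairs n l_val → Spec_has_forbidden_3vertex_subgraph counts pairs n l_val (has_forbidden_3vertex_subgraph counts pairs n l_val)

-- ===== LEMMAS AND PROOFS =====

-- the triple condition both ports test, for an ordered triple i < j < k
def pvTri (w : PySem.Dict (Int × Int) Int) (T i j k : Int) : Prop :=
  w.getD (i, j) 0 + w.getD (i, k) 0 + w.getD (j, k) 0 ≥ T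

-- symmetric (unordered) pair weight and triple condition
def pvWW (w : PySem.Dict (Int × Int) Int) (a b : Int) : Int :=
  if a < b then w.getD (a, b) 0 else w.getD (b, a) 0

def pvQQ (w : PySem.Dict (Int × Int) Int) (T a b c : Int) : Prop :=
  pvWW w a b + pvWW w a c + pvWW w b c ≥ T

lemma pvWW_comm (w : PySem.Dict (Int × Int) Int) (a b : Int) (h : a ≠ b) :
    pvWW w a b = pvWW w b a := by
  unfold pvWW
  rcases lt_trichotomy a b with h1 | h1 | h1
  · simp [h1, not_lt.mpr (le_of_lt h1)]
  · exact absurd h1 h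
  · simp [h1, not_lt.mpr (le_of_lt h1)]

lemma pvTri_iff_QQ (w : PySem.Dict (Int × Int) Int) (T i j k : Int)
    (hij : i < j) (hjk : j < k) : pvTri w T i j k ↔ pvQQ w T i j k := by
  unfold pvTri pvQQ pvWW
  simp [hij, hjk, lt_trans hij hjk]

lemma mem_cov_fold (n : Int) (L : List (Int × Int)) (s : PySem.Set Int) (x : Int) :
    x ∈ L.foldl (fun s uv =>
      if 1 ≤ uv.1 ∧ uv.1 < uv.2 ∧ uv.2 ≤ n then PySem.Set.add (PySem.Set.add s uv.1) uv.2 else s) s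
    ↔ x ∈ s ∨ ∃ p ∈ L, (1 ≤ p.1 ∧ p.1 < p.2 ∧ p.2 ≤ n) ∧ (x = p.1 ∨ x = p.2) := by
  induction L generalizing s with
  | nil => simp
  | cons p L ih =>
    simp only [List.foldl_cons, ih]
    split_ifs with hp
    · simp only [PySem.Set.mem_add, List.mem_cons]
      constructor
      · rintro (((h|rfl)|rfl)|⟨q, hq, hc, he⟩)
        · exact Or.inl h
        · exact Or.inr ⟨p, Or.inl rfl, hp, Or.inl rfl⟩
        · exact Or.inr ⟨p, Or.inl rfl, hp, Or.inr rfl⟩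
        · exact Or.inr ⟨q, Or.inr hq, hc, he⟩
      · rintro (h | ⟨q, (rfl|hq), hc, (rfl|rfl)⟩)
        · exact Or.inl (Or.inl (Or.inl h))
        · exact Or.inl (Or.inl (Or.inr rfl))
        · exact Or.inl (Or.inr rfl)
        · exact Or.inr ⟨q, hq, hc, Or.inl rfl⟩
        · exact Or.inr ⟨q, hq, hc, Or.inr rfl⟩
    · simp only [List.mem_cons]
      constructor
      · rintro (h | ⟨q, hq, hc, he⟩)
        · exact Or.inl h
        · exact Or.inr ⟨q, Or.inr hq, hc, he⟩
      · rintro (h | ⟨q, (rfl|hq), hc, he⟩)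
        · exact Or.inl h
        · exact absurd hc hp
        · exact Or.inr ⟨q, hq, hc, he⟩

lemma mem_pvCoveredSet (w : PySem.Dict (Int × Int) Int) (n x : Int) :
    x ∈ pvCoveredSet w n ↔
      ∃ p ∈ w.keys, (1 ≤ p.1 ∧ p.1 < p.2 ∧ p.2 ≤ n) ∧ (x = p.1 ∨ x = p.2) := by
  rw [pvCoveredSet, mem_cov_fold]
  simp [PySem.Set.empty]

lemma pvCoveredSet_range (w : PySem.Dict (Int × Int) Int) (n x : Int)
    (hx : x ∈ pvCoveredSet w n) : 1 ≤ x ∧ x ≤ n := by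
  rw [mem_pvCoveredSet] at hx
  obtain ⟨p, _, ⟨h1, h2, h3⟩, (rfl|rfl)⟩ := hx <;> omega

lemma getD_zero_of_uncov (w : PySem.Dict (Int × Int) Int) (n a b : Int)
    (ha : 1 ≤ a) (hab : a < b) (hb : b ≤ n)
    (h : a ∉ pvCoveredSet w n ∨ b ∉ pvCoveredSet w n) : w.getD (a, b) 0 = 0 := by
  by_cases hm : (a, b) ∈ w.keys
  · exfalso
    have hcov : a ∈ pvCoveredSet w n ∧ b ∈ pvCoveredSet w n := by
      constructor <;> rw [mem_pvCoveredSet]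
      · exact ⟨(a, b), hm, ⟨ha, hab, hb⟩, Or.inl rfl⟩
      · exact ⟨(a, b), hm, ⟨ha, hab, hb⟩, Or.inr rfl⟩
    tauto
  · apply PySem.Dict.getD_of_not_contains
    rw [← Bool.not_eq_true, PySem.Dict.contains_iff_mem_keys]
    exact hm

lemma pvWW_zero_of_uncov (w : PySem.Dict (Int × Int) Int) (n a b : Int)
    (ha : 1 ≤ a ∧ a ≤ n) (hb : 1 ≤ b ∧ b ≤ n) (hab : a ≠ b)
    (h : a ∉ pvCoveredSet w n ∨ b ∉ pvCoveredSet w n) : pvWW w a b = 0 := by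
  unfold pvWW
  rcases lt_trichotomy a b with h1 | h1 | h1
  · simp only [if_pos h1]
    exact getD_zero_of_uncov w n a b ha.1 h1 hb.2 h
  · exact absurd h1 hab
  · simp only [if_neg (not_lt.mpr (le_of_lt h1))]
    exact getD_zero_of_uncov w n b a hb.1 h1 ha.2 (h.symm)

lemma pvSpares_prefix (cov : PySem.Set Int) (n x : Int) (acc : List Int) :
    ∃ t, pvSpares cov n x acc = acc ++ t := by
  fun_induction pvSpares cov n x acc with
  | case1 x acc h ih =>
    by_cases hcx : PySem.Set.contains cov x = true
    · simpa only [hcx, if_true, dif_pos hcx] using ih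
    · simp only [if_neg hcx, dif_neg hcx] at ih ⊢
      obtain ⟨t, ht⟩ := ih
      exact ⟨x :: t, by rw [ht]; simp⟩
  | case2 x acc h => exact ⟨[], by simp⟩

lemma pvSpares_mem (cov : PySem.Set Int) (n x : Int) (acc : List Int) (y : Int)
    (hy : y ∈ pvSpares cov n x acc) : y ∈ acc ∨ (x ≤ y ∧ y ≤ n ∧ y ∉ cov) := by
  fun_induction pvSpares cov n x acc with
  | case1 x acc h ih =>
    by_cases hcx : PySem.Set.contains cov x = true
    · simp only [hcx, if_true] at ih hy
      rcases ih hy with hm | hm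
      · exact Or.inl hm
      · exact Or.inr ⟨by omega, hm.2⟩
    · simp only [if_neg hcx, dif_neg hcx] at ih hy
      rcases ih hy with hm | hm
      · rcases List.mem_append.mp hm with hm | hm
        · exact Or.inl hm
        · simp only [List.mem_singleton] at hm; subst hm
          rw [PySem.Set.contains_iff] at hcx
          exact Or.inr ⟨le_refl _, h.1, hcx⟩
      · exact Or.inr ⟨by omega, hm.2⟩
  | case2 x acc h => exact Or.inl hy

lemma pvSpares_complete (cov : PySem.Set Int) (n x : Int) (acc : List Int)
    (hlen : (pvSpares cov n x acc).length < 3) :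
    ∀ y, x ≤ y → y ≤ n → y ∉ cov → y ∈ pvSpares cov n x acc := by
  fun_induction pvSpares cov n x acc with
  | case1 x acc h ih =>
    intro y hxy hyn hyc
    by_cases hcx : PySem.Set.contains cov x = true
    · simp only [hcx, if_true] at ih hlen ⊢
      rcases eq_or_lt_of_le hxy with heq | hxy2
      · rw [PySem.Set.contains_iff] at hcx
        rw [← heq] at hyc
        exact absurd hcx hyc
      · exact ih hlen y (by omega) hyn hyc
    · simp only [if_neg hcx, dif_neg hcx] at ih hlen ⊢
      rcases eq_or_lt_of_le hxy with heq | hxy2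
      · obtain ⟨t, ht⟩ := pvSpares_prefix cov n (x + 1) (acc ++ [x])
        rw [ht, ← heq]; simp
      · exact ih hlen y (by omega) hyn hyc
  | case2 x acc h =>
    intro y hxy hyn hyc
    by_cases hxn : x ≤ n
    · exact absurd hlen (by tauto)
    · omega

lemma pvSpares_sorted (cov : PySem.Set Int) (n x : Int) (acc : List Int)
    (hacc : ∀ a ∈ acc, a < x) (hp : acc.Pairwise (· < ·)) :
    (pvSpares cov n x acc).Pairwise (· < ·) := by
  fun_induction pvSpares cov n x acc with
  | case1 x acc h ih =>
    apply ih
    · intro a ha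
      split at ha
      · exact lt_trans (hacc a ha) (by omega)
      · rcases List.mem_append.mp ha with ha | ha
        · exact lt_trans (hacc a ha) (by omega)
        · simp only [List.mem_singleton] at ha; omega
    · split
      · exact hp
      · exact List.pairwise_append.mpr ⟨hp, List.pairwise_singleton _ _,
          by intro a ha b hb; simp only [List.mem_singleton] at hb; subst hb; exact hacc a ha⟩
  | case2 x acc h => exact hp

lemma mem_pvVerts (w : PySem.Dict (Int × Int) Int) (n x : Int) :
    x ∈ pvVerts w n ↔ x ∈ pvCoveredSet w n ∨ x ∈ pvSpares (pvCoveredSet w n) n 1 [] := by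
  rw [pvVerts, PySem.List.mem_sorted, PySem.Set.mem_union]

lemma pvVerts_range (w : PySem.Dict (Int × Int) Int) (n x : Int)
    (hx : x ∈ pvVerts w n) : 1 ≤ x ∧ x ≤ n := by
  rw [mem_pvVerts] at hx
  rcases hx with hx | hx
  · exact pvCoveredSet_range w n x hx
  · rcases pvSpares_mem _ _ _ _ _ hx with h | h
    · simp at h
    · exact ⟨h.1, h.2.1⟩

lemma ordered_of_distinct (w : PySem.Dict (Int × Int) Int) (n T a b c : Int)
    (hab : a ≠ b) (hac : a ≠ c) (hbc : b ≠ c)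
    (ha : a ∈ pvVerts w n) (hb : b ∈ pvVerts w n) (hc : c ∈ pvVerts w n)
    (hq : pvQQ w T a b c) :
    ∃ i ∈ pvVerts w n, ∃ j ∈ pvVerts w n, i < j ∧ ∃ k ∈ pvVerts w n, j < k ∧ pvTri w T i j k := by
  have eab := pvWW_comm w a b hab
  have eac := pvWW_comm w a c hac
  have ebc := pvWW_comm w b c hbc
  unfold pvQQ at hq
  rcases lt_trichotomy a b with h1 | h1 | h1
  · rcases lt_trichotomy b c with h2 | h2 | h2
    · exact ⟨a, ha, b, hb, h1, c, hc, h2, by rw [pvTri_iff_QQ w T a b c h1 h2]; unfold pvQQ; omega⟩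
    · exact absurd h2 hbc
    · rcases lt_trichotomy a c with h3 | h3 | h3
      · exact ⟨a, ha, c, hc, h3, b, hb, h2, by rw [pvTri_iff_QQ w T a c b h3 h2]; unfold pvQQ; omega⟩
      · exact absurd h3 hac
      · exact ⟨c, hc, a, ha, h3, b, hb, h1, by rw [pvTri_iff_QQ w T c a b h3 h1]; unfold pvQQ; omega⟩
  · exact absurd h1 hab
  · rcases lt_trichotomy a c with h2 | h2 | h2
    · exact ⟨b, hb, a, ha, h1, c, hc, h2, by rw [pvTri_iff_QQ w T b a c h1 h2]; unfold pvQQ; omega⟩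
    · exact absurd h2 hac
    · rcases lt_trichotomy b c with h3 | h3 | h3
      · exact ⟨b, hb, c, hc, h3, a, ha, h2, by rw [pvTri_iff_QQ w T b c a h3 h2]; unfold pvQQ; omega⟩
      · exact absurd h3 hbc
      · exact ⟨c, hc, b, hb, h3, a, ha, h1, by rw [pvTri_iff_QQ w T c b a h3 h1]; unfold pvQQ; omega⟩

lemma replace_into_verts (w : PySem.Dict (Int × Int) Int) (n T i j k : Int)
    (h1 : 1 ≤ i) (hij : i < j) (hjk : j < k) (hk : k ≤ n) (hP : pvTri w T i j k) :
    ∃ a ∈ pvVerts w n, ∃ b ∈ pvVerts w n, a < b ∧ ∃ c ∈ pvVerts w n, b < c ∧ pvTri w T a b c := by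
  have hiR : 1 ≤ i ∧ i ≤ n := ⟨h1, by omega⟩
  have hjR : 1 ≤ j ∧ j ≤ n := ⟨by omega, by omega⟩
  have hkR : 1 ≤ k ∧ k ≤ n := ⟨by omega, hk⟩
  have hQ := (pvTri_iff_QQ w T i j k hij hjk).mp hP
  set cov := pvCoveredSet w n with hcov
  set sp := pvSpares cov n 1 [] with hsp
  have hcovV : ∀ x, x ∈ cov → x ∈ pvVerts w n := fun x hx => (mem_pvVerts w n x).mpr (Or.inl hx)
  have hspV : ∀ x, x ∈ sp → x ∈ pvVerts w n := fun x hx => (mem_pvVerts w n x).mpr (Or.inr hx)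
  by_cases hlen : sp.length < 3
  · -- every uncovered vertex of [1, n] is a spare, so i, j, k are all in verts
    have hall : ∀ y, 1 ≤ y → y ≤ n → y ∉ cov → y ∈ sp := pvSpares_complete cov n 1 [] hlen
    have hmem : ∀ y, 1 ≤ y → y ≤ n → y ∈ pvVerts w n := by
      intro y hy1 hy2
      by_cases hc : y ∈ cov
      · exact hcovV y hc
      · exact hspV y (hall y hy1 hy2 hc)
    exact ⟨i, hmem i hiR.1 hiR.2, j, hmem j hjR.1 hjR.2, hij, k, hmem k hkR.1 hkR.2, hjk, hP⟩
  · -- there are at least 3 spares s0 s1 s2, all uncovered and interchangeable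
    obtain ⟨s0, s1, s2, rest, hsp3⟩ : ∃ s0 s1 s2 rest, sp = s0 :: s1 :: s2 :: rest := by
      rcases sp with _ | ⟨s0, _ | ⟨s1, _ | ⟨s2, rest⟩⟩⟩ <;> simp at hlen ⊢
    have hs0m : s0 ∈ sp := by rw [hsp3]; simp
    have hs1m : s1 ∈ sp := by rw [hsp3]; simp
    have hs2m : s2 ∈ sp := by rw [hsp3]; simp
    have hsrt := pvSpares_sorted cov n 1 [] (by simp) (by simp)
    rw [← hsp, hsp3] at hsrt
    have h01 : s0 < s1 := by
      have := List.pairwise_cons.mp hsrt; exact this.1 s1 (by simp)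
    have h02 : s0 < s2 := by
      have := List.pairwise_cons.mp hsrt; exact this.1 s2 (by simp)
    have h12 : s1 < s2 := by
      have := List.pairwise_cons.mp ((List.pairwise_cons.mp hsrt).2); exact this.1 s2 (by simp)
    have sprop : ∀ s, s ∈ sp → (1 ≤ s ∧ s ≤ n) ∧ s ∉ cov := by
      intro s hs
      rcases pvSpares_mem cov n 1 [] s hs with h | h
      · simp at h
      · exact ⟨⟨h.1, h.2.1⟩, h.2.2⟩
    obtain ⟨hs0R, hs0c⟩ := sprop s0 hs0m
    obtain ⟨hs1R, hs1c⟩ := sprop s1 hs1m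
    obtain ⟨hs2R, hs2c⟩ := sprop s2 hs2m
    have hs0V := hspV s0 hs0m
    have hs1V := hspV s1 hs1m
    have hs2V := hspV s2 hs2m
    unfold pvQQ at hQ
    have hijne : i ≠ j := by omega
    have hikne : i ≠ k := by omega
    have hjkne : j ≠ k := by omega
    by_cases hi : i ∈ cov <;> by_cases hj : j ∈ cov <;> by_cases hk' : k ∈ cov
    · -- all covered
      exact ⟨i, hcovV i hi, j, hcovV j hj, hij, k, hcovV k hk', hjk, hP⟩
    · -- i, j covered, k not: use (i, j, s0)
      have z1 : pvWW w i k = 0 := pvWW_zero_of_uncov w n i k hiR hkR hikne (Or.inr hk')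
      have z2 : pvWW w j k = 0 := pvWW_zero_of_uncov w n j k hjR hkR hjkne (Or.inr hk')
      have z3 : pvWW w i s0 = 0 := pvWW_zero_of_uncov w n i s0 hiR hs0R
        (fun h => hs0c (h ▸ hi)) (Or.inr hs0c)
      have z4 : pvWW w j s0 = 0 := pvWW_zero_of_uncov w n j s0 hjR hs0R
        (fun h => hs0c (h ▸ hj)) (Or.inr hs0c)
      exact ordered_of_distinct w n T i j s0 hijne (fun h => hs0c (h ▸ hi))
        (fun h => hs0c (h ▸ hj)) (hcovV i hi) (hcovV j hj) hs0V
        (by unfold pvQQ; omega)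
    · -- i, k covered, j not: use (i, s0, k)
      have z1 : pvWW w i j = 0 := pvWW_zero_of_uncov w n i j hiR hjR hijne (Or.inr hj)
      have z2 : pvWW w j k = 0 := pvWW_zero_of_uncov w n j k hjR hkR hjkne (Or.inl hj)
      have z3 : pvWW w i s0 = 0 := pvWW_zero_of_uncov w n i s0 hiR hs0R
        (fun h => hs0c (h ▸ hi)) (Or.inr hs0c)
      have z4 : pvWW w s0 k = 0 := pvWW_zero_of_uncov w n s0 k hs0R hkR
        (fun h => hs0c (h.symm ▸ hk')) (Or.inl hs0c)
      exact ordered_of_distinct w n T i s0 k (fun h => hs0c (h ▸ hi)) hikne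
        (fun h => hs0c (h.symm ▸ hk')) (hcovV i hi) hs0V (hcovV k hk')
        (by unfold pvQQ; omega)
    · -- only i covered: use (i, s0, s1)
      have z1 : pvWW w i j = 0 := pvWW_zero_of_uncov w n i j hiR hjR hijne (Or.inr hj)
      have z2 : pvWW w i k = 0 := pvWW_zero_of_uncov w n i k hiR hkR hikne (Or.inr hk')
      have z3 : pvWW w j k = 0 := pvWW_zero_of_uncov w n j k hjR hkR hjkne (Or.inl hj)
      have z4 : pvWW w i s0 = 0 := pvWW_zero_of_uncov w n i s0 hiR hs0R
        (fun h => hs0c (h ▸ hi)) (Or.inr hs0c)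
      have z5 : pvWW w i s1 = 0 := pvWW_zero_of_uncov w n i s1 hiR hs1R
        (fun h => hs1c (h ▸ hi)) (Or.inr hs1c)
      have z6 : pvWW w s0 s1 = 0 := pvWW_zero_of_uncov w n s0 s1 hs0R hs1R
        (by omega) (Or.inl hs0c)
      exact ordered_of_distinct w n T i s0 s1 (fun h => hs0c (h ▸ hi))
        (fun h => hs1c (h ▸ hi)) (by omega) (hcovV i hi) hs0V hs1V
        (by unfold pvQQ; omega)
    · -- j, k covered, i not: use (s0, j, k)
      have z1 : pvWW w i j = 0 := pvWW_zero_of_uncov w n i j hiR hjR hijne (Or.inl hi)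
      have z2 : pvWW w i k = 0 := pvWW_zero_of_uncov w n i k hiR hkR hikne (Or.inl hi)
      have z3 : pvWW w s0 j = 0 := pvWW_zero_of_uncov w n s0 j hs0R hjR
        (fun h => hs0c (h.symm ▸ hj)) (Or.inl hs0c)
      have z4 : pvWW w s0 k = 0 := pvWW_zero_of_uncov w n s0 k hs0R hkR
        (fun h => hs0c (h.symm ▸ hk')) (Or.inl hs0c)
      exact ordered_of_distinct w n T s0 j k (fun h => hs0c (h.symm ▸ hj))
        (fun h => hs0c (h.symm ▸ hk')) hjkne hs0V (hcovV j hj) (hcovV k hk')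
        (by unfold pvQQ; omega)
    · -- only j covered: use (s0, j, s1)
      have z1 : pvWW w i j = 0 := pvWW_zero_of_uncov w n i j hiR hjR hijne (Or.inl hi)
      have z2 : pvWW w i k = 0 := pvWW_zero_of_uncov w n i k hiR hkR hikne (Or.inl hi)
      have z3 : pvWW w j k = 0 := pvWW_zero_of_uncov w n j k hjR hkR hjkne (Or.inr hk')
      have z4 : pvWW w s0 j = 0 := pvWW_zero_of_uncov w n s0 j hs0R hjR
        (fun h => hs0c (h.symm ▸ hj)) (Or.inl hs0c)
      have z5 : pvWW w s0 s1 = 0 := pvWW_zero_of_uncov w n s0 s1 hs0R hs1R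
        (by omega) (Or.inl hs0c)
      have z6 : pvWW w j s1 = 0 := pvWW_zero_of_uncov w n j s1 hjR hs1R
        (fun h => hs1c (h ▸ hj)) (Or.inr hs1c)
      exact ordered_of_distinct w n T s0 j s1 (fun h => hs0c (h.symm ▸ hj)) (by omega)
        (fun h => hs1c (h ▸ hj)) hs0V (hcovV j hj) hs1V
        (by unfold pvQQ; omega)
    · -- only k covered: use (s0, s1, k)
      have z1 : pvWW w i j = 0 := pvWW_zero_of_uncov w n i j hiR hjR hijne (Or.inl hi)
      have z2 : pvWW w i k = 0 := pvWW_zero_of_uncov w n i k hiR hkR hikne (Or.inl hi)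
      have z3 : pvWW w j k = 0 := pvWW_zero_of_uncov w n j k hjR hkR hjkne (Or.inl hj)
      have z4 : pvWW w s0 s1 = 0 := pvWW_zero_of_uncov w n s0 s1 hs0R hs1R
        (by omega) (Or.inl hs0c)
      have z5 : pvWW w s0 k = 0 := pvWW_zero_of_uncov w n s0 k hs0R hkR
        (fun h => hs0c (h.symm ▸ hk')) (Or.inl hs0c)
      have z6 : pvWW w s1 k = 0 := pvWW_zero_of_uncov w n s1 k hs1R hkR
        (fun h => hs1c (h.symm ▸ hk')) (Or.inl hs1c)
      exact ordered_of_distinct w n T s0 s1 k (by omega)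
        (fun h => hs0c (h.symm ▸ hk')) (fun h => hs1c (h.symm ▸ hk')) hs0V hs1V (hcovV k hk')
        (by unfold pvQQ; omega)
    · -- none covered: use (s0, s1, s2)
      have z1 : pvWW w i j = 0 := pvWW_zero_of_uncov w n i j hiR hjR hijne (Or.inl hi)
      have z2 : pvWW w i k = 0 := pvWW_zero_of_uncov w n i k hiR hkR hikne (Or.inl hi)
      have z3 : pvWW w j k = 0 := pvWW_zero_of_uncov w n j k hjR hkR hjkne (Or.inl hj)
      have z4 : pvWW w s0 s1 = 0 := pvWW_zero_of_uncov w n s0 s1 hs0R hs1R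
        (by omega) (Or.inl hs0c)
      have z5 : pvWW w s0 s2 = 0 := pvWW_zero_of_uncov w n s0 s2 hs0R hs2R
        (by omega) (Or.inl hs0c)
      have z6 : pvWW w s1 s2 = 0 := pvWW_zero_of_uncov w n s1 s2 hs1R hs2R
        (by omega) (Or.inl hs1c)
      exact ordered_of_distinct w n T s0 s1 s2 (by omega) (by omega) (by omega)
        hs0V hs1V hs2V (by unfold pvQQ; omega)

lemma A_true_iff (counts : List Int) (pairs : List (Int × Int)) (n l_val : Int) :
    has_forbidden_3vertex_subgraph counts pairs n l_val = true ↔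
      (¬ n < 3 ∧ ∃ i, (1 ≤ i ∧ i < n + 1) ∧ ∃ j, (i + 1 ≤ j ∧ j < n + 1) ∧ ∃ k,
        (j + 1 ≤ k ∧ k < n + 1) ∧ pvTri (pvZipDict pairs counts) (2 * l_val - 2) i j k) := by
  have hw : pair_to_count counts pairs = pvZipDict pairs counts := rfl
  unfold has_forbidden_3vertex_subgraph
  split_ifs with h
  · simp [h]
  · simp [h, List.any_eq_true, PySem.List.mem_pyRange_one, pvTri, hw, ge_iff_le]

lemma B_true_iff (counts : List Int) (pairs : List (Int × Int)) (n l_val : Int) :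
    has_forbidden_3vertex_subgraph_alt counts pairs n l_val = true ↔
      (¬ n < 3 ∧ ∃ i ∈ pvVerts (pvZipDict pairs counts) n, ∃ j ∈ pvVerts (pvZipDict pairs counts) n,
        i < j ∧ ∃ k ∈ pvVerts (pvZipDict pairs counts) n, j < k ∧
          pvTri (pvZipDict pairs counts) (2 * l_val - 2) i j k) := by
  unfold has_forbidden_3vertex_subgraph_alt
  split_ifs with h
  · simp [h]
  · simp [h, List.any_eq_true, Bool.and_eq_true, pvTri, ge_iff_le]

-- ===== VERDICT (by name: the statement is the Claim_ definition above) =====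
theorem has_forbidden_3vertex_subgraph_spec : Claim_equal_has_forbidden_3vertex_subgraph := by
  intro counts pairs n l_val _
  unfold Spec_has_forbidden_3vertex_subgraph
  rw [Bool.eq_iff_iff, A_true_iff, B_true_iff]
  constructor
  · rintro ⟨h3, i, ⟨hi1, hi2⟩, j, ⟨hj1, hj2⟩, k, ⟨hk1, hk2⟩, hP⟩
    exact ⟨h3, replace_into_verts _ n _ i j k hi1 (by omega) (by omega) (by omega) hP⟩
  · rintro ⟨h3, i, hi, j, hj, hij, k, hk, hjk, hP⟩
    have ri := pvVerts_range _ n i hi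
    have rj := pvVerts_range _ n j hj
    have rk := pvVerts_range _ n k hk
    exact ⟨h3, i, ⟨by omega, by omega⟩, j, ⟨by omega, by omega⟩, k, ⟨by omega, by omega⟩, hP⟩
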